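-- pv_equiv track=rewrite | github.com/Ashiq-am/Path-of-Python | 39.Python Programming Examples/3.List Programs/Remove all the palindromic words from the given sentence/1.isPalindrome().py | removePalinWords
-- ===== SOURCE A (Python) =====
-- def isPalindrome(string):
--     i = 0
--     j = len(string) - 1
--
--     # traversing from both the ends
--     while (i < j):
--
--         # not palindrome
--         if (string[i] != string[j]):
--             return False
--         i += 1
--         j -= 1
--
--     # palindrome
--     return True
--
-- def removePalinWords(string):
--     # 'final_str' to store the final string and
--     # 'word' to one by one store each word of 'str'
--     final_str = ""
--     word = ""
--
--     # add space at the end of 'str'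
--     string = string + " "
--     n = len(string)
--
--     # traversing 'str'
--     for i in range(n):
--
--         # accumulating characters of the current word
--         if (string[i] != ' '):
--             word = word + string[i]
--
--         else:
--
--             # if 'word' is not palindrome then a
--             # add it to 'final_str'
--             if (not (isPalindrome(word))):
--                 final_str += word + " "
--
--             # reset
--             word = ""
--
--     # required final string
--     return final_str
-- ===== SOURCE B (Python) =====
-- def removePalinWords(string):
--     words = string.split(' ')
--     return "".join(w + " " for w in words if w != w[::-1])
-- ===== Notes on version B (the rewrite author's own statement) =====
-- stated objective: idiomatic
-- what changed: Replaces the character-by-character scan with explicit word/result string accumulators and a two-pointer palindrome helper by splitting on the single-space separator and joining the non-palindromic words (slice-reversal test), each with a trailing space.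
import Mathlib
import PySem

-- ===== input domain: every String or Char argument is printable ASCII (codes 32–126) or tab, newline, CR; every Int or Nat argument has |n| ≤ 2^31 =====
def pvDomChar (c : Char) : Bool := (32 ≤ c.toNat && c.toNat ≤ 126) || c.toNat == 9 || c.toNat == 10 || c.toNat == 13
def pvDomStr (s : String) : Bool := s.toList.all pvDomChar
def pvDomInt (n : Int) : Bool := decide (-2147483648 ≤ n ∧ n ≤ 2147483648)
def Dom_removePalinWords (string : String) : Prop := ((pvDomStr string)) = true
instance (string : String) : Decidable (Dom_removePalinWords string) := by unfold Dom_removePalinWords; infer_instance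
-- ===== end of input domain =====

-- B rewrites A's character-scan with word/result accumulators as split-on-space / filter / join (idiomatic decomposition, same cost).

-- ===== PORT A =====
-- isPalindrome: the two-pointer while loop (indices are always in range when called, so pyGetD's default is never read)
def isPalLoopA (s : List Char) (i j : Int) : Bool :=
  if _h : i < j then
    if PySem.List.pyGetD s i ' ' ≠ PySem.List.pyGetD s j ' ' then false
    else isPalLoopA s (i + 1) (j - 1)
  else true
termination_by (j - i).toNat
decreasing_by omega

def isPalindromeA (s : List Char) : Bool :=
  isPalLoopA s 0 ((s.length : Int) - 1)

def removePalinWords (string : String) : String :=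
  -- string = string + " "
  let s := string.toList ++ [' ']
  let n : Int := (s.length : Int)
  -- for i in range(n), state (final_str, word)
  let res := (PySem.List.pyRange 0 n 1).foldl
    (fun (st : List Char × List Char) i =>
      let c := PySem.List.pyGetD s i ' '   -- string[i], always in range
      if c ≠ ' ' then (st.1, st.2 ++ [c])
      else (if ¬ (isPalindromeA st.2) then st.1 ++ st.2 ++ [' '] else st.1, ([] : List Char)))
    (([] : List Char), ([] : List Char))
  String.ofList res.1

-- ===== PORT B =====
def removePalinWords_alt (string : String) : String :=
  let words := PySem.Chars.splitOn string.toList [' ']          -- string.split(' ')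
  -- w != w[::-1]  (slice [::-1] is reversal: PySem.Chars.slice?_none_none_neg_one)
  let kept := words.filter (fun w => w != w.reverse)
  String.ofList (PySem.Chars.join [] (kept.map (fun w => w ++ [' '])))   -- "".join(w + " " …)

-- ===== PRECONDITION & SPEC =====
def Spec_removePalinWords (string : String) (out : String) : Prop := out = removePalinWords_alt string
instance (string : String) (out : String) : Decidable (Spec_removePalinWords string out) := by unfold Spec_removePalinWords; infer_instance

-- ===== CLAIM (what is proved, stated in full; the proofs are below) =====
def Claim_equal_removePalinWords : Prop := ∀ (string : String), Dom_removePalinWords string → Spec_removePalinWords string (removePalinWords string)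

-- ===== LEMMAS AND PROOFS =====

-- structural split-on-space (proof-side mirror of PySem.Chars.splitOn.go with sep = [' '])
def spl : List Char → List Char → List (List Char)
  | [], cur => [cur.reverse]
  | c :: rest, cur => if c = ' ' then cur.reverse :: spl rest [] else spl rest (c :: cur)

lemma splitOn_go_eq_spl : ∀ (fuel : Nat) (l cur : List Char) (acc : List (List Char)),
    l.length < fuel →
    PySem.Chars.splitOn.go [' '] fuel l cur acc = acc.reverse ++ spl l cur := by
  intro fuel
  induction fuel with
  | zero => intro l cur acc h; omega
  | succ n ih =>
    intro l cur acc h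
    cases l with
    | nil =>
      simp [PySem.Chars.splitOn.go, spl]
    | cons c rest =>
      rw [PySem.Chars.splitOn.go]
      by_cases hc : c = ' '
      · subst hc
        rw [if_pos (show (List.isPrefixOf [' '] (' ' :: rest)) = true by
          simp [List.isPrefixOf])]
        simp only [List.length_cons, List.length_nil, List.drop_succ_cons, List.drop_zero]
        rw [ih rest [] (cur.reverse :: acc) (by simpa using Nat.lt_of_succ_lt_succ h)]
        simp [spl]
      · rw [if_neg (show ¬ (List.isPrefixOf [' '] (c :: rest)) = true by
          simp [List.isPrefixOf]; intro hceq; exact absurd hceq.symm hc)]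
        rw [ih rest (c :: cur) acc (by simpa using Nat.lt_of_succ_lt_succ h)]
        simp [spl, hc]

lemma splitOn_eq_spl (l : List Char) : PySem.Chars.splitOn l [' '] = spl l [] := by
  unfold PySem.Chars.splitOn
  rw [splitOn_go_eq_spl (l.length + 1) l [] [] (by omega)]
  simp

-- two-pointer loop ⇔ index-symmetric palindrome condition on [i, j]
lemma isPalLoopA_iff (s : List Char) : ∀ (i j : Int), 0 ≤ i →
    (isPalLoopA s i j = true ↔
      ∀ k : Int, i ≤ k → k ≤ j → PySem.List.pyGetD s k ' ' = PySem.List.pyGetD s (i + j - k) ' ') := by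
  intro i j
  induction hfuel : (j - i).toNat using Nat.strong_induction_on generalizing i j with
  | _ n ih =>
    intro hi
    rw [isPalLoopA]
    by_cases hij : i < j
    · simp only [dif_pos hij]
      by_cases hne : PySem.List.pyGetD s i ' ' ≠ PySem.List.pyGetD s j ' '
      · simp only [if_pos hne]
        constructor
        · intro hfalse; exact absurd hfalse (by simp)
        · intro hall
          exact absurd (by simpa using hall i le_rfl (le_of_lt hij)) hne
      · simp only [if_neg hne]
        simp only [ne_eq, not_not] at hne
        rw [ih ((j - 1) - (i + 1)).toNat (by omega) (i+1) (j-1) rfl (by omega)]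
        constructor
        · intro hall k hk1 hk2
          by_cases hki : k = i
          · subst hki; simpa using hne
          · by_cases hkj : k = j
            · subst hkj; rw [← hne]; congr 1; omega
            · have := hall k (by omega) (by omega)
              rw [this]; congr 1; omega
        · intro hall k hk1 hk2
          have := hall k (by omega) (by omega)
          rw [this]; congr 1; omega
    · simp only [dif_neg hij]
      constructor
      · intro _ k hk1 hk2
        have hk : k = i := by omega
        have hk' : i + j - k = k := by omega
        rw [hk']
      · intro _; trivial

lemma isPalindromeA_iff (w : List Char) : isPalindromeA w = true ↔ w = w.reverse := by
  unfold isPalindromeA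
  rw [isPalLoopA_iff w 0 ((w.length : Int) - 1) le_rfl]
  constructor
  · intro hall
    apply List.ext_getElem (by simp)
    intro k hk hk'
    rw [List.getElem_reverse]
    have := hall (k : Int) (by omega) (by omega)
    have h1 : PySem.List.pyGetD w (k : Int) ' ' = w.getD k ' ' := PySem.List.pyGetD_natCast w k ' '
    have h2 : (0 + ((w.length : Int) - 1) - (k : Int)) = ((w.length - 1 - k : Nat) : Int) := by
      omega
    rw [h1, h2, PySem.List.pyGetD_natCast] at this
    rw [List.getD_eq_getElem w ' ' hk] at this
    rw [List.getD_eq_getElem w ' ' (by omega)] at this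
    exact this
  · intro hrev k hk1 hk2
    have hk : ∃ m : Nat, k = (m : Int) ∧ m < w.length := ⟨k.toNat, by omega, by omega⟩
    obtain ⟨m, rfl, hm⟩ := hk
    have h2 : (0 + ((w.length : Int) - 1) - (m : Int)) = ((w.length - 1 - m : Nat) : Int) := by
      omega
    rw [h2, PySem.List.pyGetD_natCast, PySem.List.pyGetD_natCast]
    rw [List.getD_eq_getElem w ' ' hm, List.getD_eq_getElem w ' ' (by omega)]
    rw [List.getElem_of_eq hrev hm, List.getElem_reverse]

-- the word A emits
def emitA (w : List Char) : List Char :=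
  if ¬ (isPalindromeA w) then w ++ [' '] else []

-- A's loop body as a named step function
def stepA (st : List Char × List Char) (c : Char) : List Char × List Char :=
  if c ≠ ' ' then (st.1, st.2 ++ [c])
  else (if ¬ (isPalindromeA st.2) then st.1 ++ st.2 ++ [' '] else st.1, ([] : List Char))

lemma foldl_stepA_spl : ∀ (cs f w : List Char),
    ((cs ++ [' ']).foldl stepA (f, w)).1 = f ++ ((spl cs w.reverse).map emitA).flatten := by
  intro cs
  induction cs with
  | nil =>
    intro f w
    simp [stepA, spl, emitA]
    split_ifs <;> simp
  | cons c rest ih =>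
    intro f w
    by_cases hc : c = ' '
    · subst hc
      simp only [List.cons_append, List.foldl_cons]
      rw [show stepA (f, w) ' ' = (f ++ emitA w, []) by
        simp [stepA, emitA]; split_ifs <;> simp]
      rw [ih (f ++ emitA w) []]
      simp [spl]
    · simp only [List.cons_append, List.foldl_cons]
      rw [show stepA (f, w) c = (f, w ++ [c]) by simp [stepA, hc]]
      rw [ih f (w ++ [c])]
      simp [spl, hc]

lemma join_nil_eq_flatten (parts : List (List Char)) :
    PySem.Chars.join [] parts = parts.flatten := by
  induction parts with
  | nil => simp [PySem.Chars.join, List.intercalate]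
  | cons p ps ih =>
    cases ps with
    | nil => simp [PySem.Chars.join, List.intercalate]
    | cons q qs =>
      simp only [PySem.Chars.join, List.intercalate] at ih ⊢
      simp [List.intersperse_cons₂, ih]

lemma filter_map_flatten (ws : List (List Char)) :
    ((ws.filter (fun w => w != w.reverse)).map (fun w => w ++ [' '])).flatten
      = (ws.map emitA).flatten := by
  induction ws with
  | nil => rfl
  | cons w rest ih =>
    by_cases hw : w = w.reverse
    · have hb : (w != w.reverse) = false := bne_eq_false_iff_eq.mpr hw
      have hpal : isPalindromeA w = true := (isPalindromeA_iff w).mpr hw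
      simp only [List.filter_cons, hb, Bool.false_eq_true, if_false,
        List.map_cons, List.flatten_cons]
      rw [show emitA w = [] by rw [emitA, hpal]; simp]
      simpa using ih
    · have hb : (w != w.reverse) = true := bne_iff_ne.mpr hw
      have hpal : isPalindromeA w = false :=
        Bool.eq_false_iff.mpr (fun hc => hw ((isPalindromeA_iff w).mp hc))
      simp only [List.filter_cons, hb, if_pos, List.map_cons, List.flatten_cons]
      rw [show emitA w = w ++ [' '] by rw [emitA, hpal]; simp]
      rw [ih]

-- ===== VERDICT (by name: the statement is the Claim_ definition above) =====
theorem removePalinWords_spec : Claim_equal_removePalinWords := by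
  intro string _hdom
  unfold Spec_removePalinWords removePalinWords removePalinWords_alt
  simp only []
  rw [show (PySem.List.pyRange 0 ((string.toList ++ [' ']).length : Int) 1).foldl
        (fun (st : List Char × List Char) i =>
          let c := PySem.List.pyGetD (string.toList ++ [' ']) i ' '
          if c ≠ ' ' then (st.1, st.2 ++ [c])
          else (if ¬ (isPalindromeA st.2) then st.1 ++ st.2 ++ [' '] else st.1, ([] : List Char)))
        (([] : List Char), ([] : List Char))
      = (string.toList ++ [' ']).foldl stepA ([], []) from
    PySem.List.foldl_pyRange_zero_pyGetD' (string.toList ++ [' ']) ' ' stepA ([], [])]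
  rw [foldl_stepA_spl string.toList [] []]
  rw [splitOn_eq_spl, join_nil_eq_flatten, filter_map_flatten]
  simp
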